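-- pv_equiv track=rewrite | github.com/Kittensx/Semantic-Prompt | scripts/semantic_prompt.py | _parse_category_order
-- ===== SOURCE A (Python) =====
-- def _parse_category_order(order_text: str, known_categories: list[str]) -> list[str]:
--     raw = (order_text or "").strip()
--     if not raw:
--         return known_categories[:]
--
--     parts = [x.strip().lower() for x in raw.split(",") if x.strip()]
--
--     out = []
--     seen = set()
--
--     # Add categories the user explicitly listed (if valid)
--     for c in parts:
--         if c in known_categories and c not in seen:
--             out.append(c)
--             seen.add(c)
--
--     # Append any categories not mentioned
--     for c in known_categories:
--         if c not in seen:
--             out.append(c)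
--
--     return out
-- ===== SOURCE B (Python) =====
-- def _parse_category_order(order_text: str, known_categories: list[str]) -> list[str]:
--     raw = (order_text or "").strip()
--     if not raw:
--         return known_categories[:]
--
--     parts = [x.strip().lower() for x in raw.split(",") if x.strip()]
--     n = len(parts)
--
--     # rank: first occurrence index of each part
--     rank = {}
--     for i, p in enumerate(parts):
--         rank.setdefault(p, i)
--
--     # one pass over known_categories: key each (deduplicated-if-listed) entry,
--     # listed ones by their user rank, unlisted ones after everything (n + i)
--     keyed = []
--     seen = set()
--     for i, c in enumerate(known_categories):
--         r = rank.get(c)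
--         if r is None:
--             keyed.append((n + i, c))
--         elif c not in seen:
--             seen.add(c)
--             keyed.append((r, c))
--
--     return [c for _, c in sorted(keyed, key=lambda t: t[0])]
-- ===== Notes on version B (the rewrite author's own statement) =====
-- stated objective: alternative
-- what changed: A builds the result in two passes (scan the parsed parts appending valid new ones, then scan known_categories appending unmentioned ones); B instead builds a first-occurrence rank table from the parts, makes a single keyed pass over known_categories (listed categories deduplicated and keyed by their user rank, unlisted ones keyed past the end by position) and lets one sort by key produce the final order.
import Mathlib
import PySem

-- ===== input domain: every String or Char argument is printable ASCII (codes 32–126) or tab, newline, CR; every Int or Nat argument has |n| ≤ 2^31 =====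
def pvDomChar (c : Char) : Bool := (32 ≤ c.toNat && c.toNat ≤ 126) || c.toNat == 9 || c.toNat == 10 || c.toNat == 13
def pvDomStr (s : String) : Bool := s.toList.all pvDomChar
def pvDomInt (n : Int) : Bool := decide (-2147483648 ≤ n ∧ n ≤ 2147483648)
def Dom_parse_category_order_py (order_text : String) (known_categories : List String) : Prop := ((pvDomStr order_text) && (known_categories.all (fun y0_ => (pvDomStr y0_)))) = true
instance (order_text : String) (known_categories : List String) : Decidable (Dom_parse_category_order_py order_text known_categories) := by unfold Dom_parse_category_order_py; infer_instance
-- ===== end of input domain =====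

-- B replaces A's two build-and-scan passes by a first-occurrence rank table and one
-- stable key sort (objective: alternative algorithm, similar cost).

-- ===== PORT A =====
-- parts = [x.strip().lower() for x in raw.split(",") if x.strip()]  (split? is some: sep "," ≠ "")
def pvParts (raw : String) : List String :=
  (((PySem.Str.split? raw ",").getD []).filter
      (fun x => !(PySem.Str.strip x == ""))).map (fun x => PySem.Str.lower (PySem.Str.strip x))

def parse_category_order_py (order_text : String) (known_categories : List String) : List String :=
  let raw := PySem.Str.strip order_text
  if raw = "" then known_categories
  else
    let parts := pvParts raw
    -- first loop: out/seen over parts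
    let os := parts.foldl
      (fun (st : List String × PySem.Set String) c =>
        if c ∈ known_categories ∧ c ∉ st.2 then (st.1 ++ [c], PySem.Set.add st.2 c) else st)
      ([], PySem.Set.empty)
    -- second loop: append any categories not mentioned
    known_categories.foldl (fun out c => if c ∉ os.2 then out ++ [c] else out) os.1

-- ===== PORT B =====
def parse_category_order_py_alt (order_text : String) (known_categories : List String) : List String :=
  let raw := PySem.Str.strip order_text
  if raw = "" then known_categories
  else
    let parts := pvParts raw
    let n : Int := parts.length
    -- rank = first-occurrence index of each part (setdefault loop)
    let rank := (PySem.List.enumerate parts 0).foldl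
      (fun d p => PySem.Dict.setdefault d p.2 p.1) PySem.Dict.empty
    -- one pass over known_categories building (key, category) pairs
    let ks := (PySem.List.enumerate known_categories 0).foldl
      (fun (st : List (Int × String) × PySem.Set String) ic =>
        match PySem.Dict.get? rank ic.2 with
        | none => (st.1 ++ [(n + ic.1, ic.2)], st.2)
        | some r => if ic.2 ∈ st.2 then st else (st.1 ++ [(r, ic.2)], PySem.Set.add st.2 ic.2))
      ([], PySem.Set.empty)
    (PySem.List.sorted ks.1 (fun t => t.1) false).map (fun t => t.2)

-- ===== PRECONDITION & SPEC =====
def Spec_parse_category_order_py (order_text : String) (known_categories : List String) (out : List String) : Prop := out = parse_category_order_py_alt order_text known_categories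
instance (order_text : String) (known_categories : List String) (out : List String) : Decidable (Spec_parse_category_order_py order_text known_categories out) := by unfold Spec_parse_category_order_py; infer_instance

-- ===== CLAIM (what is proved, stated in full; the proofs are below) =====
def Claim_equal_parse_category_order_py : Prop := ∀ (order_text : String) (known_categories : List String), Dom_parse_category_order_py order_text known_categories → Spec_parse_category_order_py order_text known_categories (parse_category_order_py order_text known_categories)

-- ===== LEMMAS AND PROOFS =====

-- first-occurrence dedup with an explicit seen set (proof-side model of both loops' dedup)
def pvDed : List String → PySem.Set String → List String
  | [], _ => []
  | c :: l, s => if c ∈ s then pvDed l s else c :: pvDed l (PySem.Set.add s c)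

-- proof-side model of B's pass over enumerate(known): the mentioned (deduplicated) entries …
def pvMent (P : List String) : List (Int × String) → PySem.Set String → List (Int × String)
  | [], _ => []
  | ic :: l, s =>
    if ic.2 ∈ P then
      (if ic.2 ∈ s then pvMent P l s
       else ((P.idxOf ic.2 : Int), ic.2) :: pvMent P l (PySem.Set.add s ic.2))
    else pvMent P l s

-- … and the unmentioned ones
def pvUnm (P : List String) (n : Int) : List (Int × String) → List (Int × String)
  | [] => []
  | ic :: l => if ic.2 ∈ P then pvUnm P n l else (n + ic.1, ic.2) :: pvUnm P n l

theorem pvDed_mem (l : List String) (s : PySem.Set String) (x : String) :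
    x ∈ pvDed l s ↔ x ∈ l ∧ x ∉ s := by
  induction l generalizing s with
  | nil => simp [pvDed]
  | cons c l ih =>
    by_cases hc : c ∈ s
    · simp only [pvDed, if_pos hc, ih, List.mem_cons]
      constructor
      · rintro ⟨h1, h2⟩; exact ⟨Or.inr h1, h2⟩
      · rintro ⟨h1 | h1, h2⟩
        · exact absurd (h1 ▸ hc) h2
        · exact ⟨h1, h2⟩
    · simp only [pvDed, if_neg hc, List.mem_cons, ih, PySem.Set.mem_add]
      constructor
      · rintro (rfl | ⟨h1, h2⟩)
        · exact ⟨Or.inl rfl, hc⟩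
        · exact ⟨Or.inr h1, fun hx => h2 (Or.inl hx)⟩
      · rintro ⟨rfl | h1, h2⟩
        · exact Or.inl rfl
        · by_cases hxc : x = c
          · exact Or.inl hxc
          · exact Or.inr ⟨h1, fun hx => hx.elim h2 hxc⟩

theorem pvDed_nodup (l : List String) (s : PySem.Set String) : (pvDed l s).Nodup := by
  induction l generalizing s with
  | nil => simp [pvDed]
  | cons c l ih =>
    by_cases hc : c ∈ s
    · simpa [pvDed, hc] using ih s
    · rw [pvDed, if_neg hc]
      refine List.Pairwise.cons ?_ (ih _)
      intro b hb
      have := (pvDed_mem l (PySem.Set.add s c) b).mp hb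
      rcases this with ⟨_, hbs⟩
      intro h; exact hbs (h ▸ (PySem.Set.mem_add s c c).mpr (Or.inr rfl))

theorem pvDed_pairwise (l : List String) (s : PySem.Set String) :
    (pvDed l s).Pairwise (fun a b => l.idxOf a < l.idxOf b) := by
  induction l generalizing s with
  | nil => simp [pvDed]
  | cons c l ih =>
    by_cases hc : c ∈ s
    · rw [pvDed, if_pos hc]
      refine ((ih s).imp_of_mem ?_)
      intro a b ha hb h
      have hane : a ≠ c := fun h' => (((pvDed_mem l s a).mp ha).2) (h' ▸ hc)
      have hbne : b ≠ c := fun h' => (((pvDed_mem l s b).mp hb).2) (h' ▸ hc)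
      rw [List.idxOf_cons_ne l (Ne.symm hane), List.idxOf_cons_ne l (Ne.symm hbne)]
      omega
    · rw [pvDed, if_neg hc]
      refine List.Pairwise.cons ?_ ?_
      · intro b hb
        have hbne : b ≠ c := by
          have := ((pvDed_mem l (PySem.Set.add s c) b).mp hb).2
          intro h'; exact this (h' ▸ (PySem.Set.mem_add s c c).mpr (Or.inr rfl))
        rw [List.idxOf_cons_self, List.idxOf_cons_ne l (Ne.symm hbne)]
        omega
      · refine ((ih _).imp_of_mem ?_)
        intro a b ha hb h
        have hane : a ≠ c := by
          have := ((pvDed_mem l _ a).mp ha).2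
          intro h'; exact this (h' ▸ (PySem.Set.mem_add s c c).mpr (Or.inr rfl))
        have hbne : b ≠ c := by
          have := ((pvDed_mem l _ b).mp hb).2
          intro h'; exact this (h' ▸ (PySem.Set.mem_add s c c).mpr (Or.inr rfl))
        rw [List.idxOf_cons_ne l (Ne.symm hane), List.idxOf_cons_ne l (Ne.symm hbne)]
        omega

theorem pvUpdate_eq (l : List String) (s : PySem.Set String) :
    PySem.Set.update s l = s ++ pvDed l s := by
  induction l generalizing s with
  | nil => simp [pvDed, PySem.Set.update]
  | cons c l ih =>
    by_cases hc : c ∈ s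
    · show PySem.Set.update (PySem.Set.add s c) l = _
      rw [PySem.Set.add_of_mem hc, ih, pvDed, if_pos hc]
    · show PySem.Set.update (PySem.Set.add s c) l = _
      rw [PySem.Set.add_of_not_mem hc, ih, pvDed, if_neg hc, List.append_assoc,
        List.singleton_append, ← PySem.Set.add_of_not_mem hc]

theorem pvIdx_filter_mono (P : List String) (p : String → Bool) (a b : String)
    (ha : a ∈ P.filter p) (hb : b ∈ P.filter p)
    (h : (P.filter p).idxOf a < (P.filter p).idxOf b) : P.idxOf a < P.idxOf b := by
  induction P with
  | nil => simp at ha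
  | cons x P ih =>
    by_cases hp : p x
    · rw [List.filter_cons_of_pos hp] at ha hb h
      by_cases hax : a = x
      · subst hax
        have hbx : b ≠ a := by
          intro h'; subst h'; simp at h
        rw [List.idxOf_cons_self] at *
        rw [List.idxOf_cons_ne P (Ne.symm hbx)]
        omega
      · rw [List.idxOf_cons_ne _ (Ne.symm hax)] at h ⊢
        by_cases hbx : b = x
        · subst hbx; rw [List.idxOf_cons_self] at h; omega
        · rw [List.idxOf_cons_ne _ (Ne.symm hbx)] at h ⊢
          have ha' : a ∈ P.filter p := by
            rcases List.mem_cons.mp ha with h' | h'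
            · exact absurd h' hax
            · exact h'
          have hb' : b ∈ P.filter p := by
            rcases List.mem_cons.mp hb with h' | h'
            · exact absurd h' hbx
            · exact h'
          have := ih ha' hb' (by omega)
          omega
    · rw [List.filter_cons_of_neg (by simpa using hp)] at ha hb h
      have hax : a ≠ x := by
        intro h'; subst h'
        exact hp (List.of_mem_filter ha)
      have hbx : b ≠ x := by
        intro h'; subst h'
        exact hp (List.of_mem_filter hb)
      rw [List.idxOf_cons_ne _ (Ne.symm hax), List.idxOf_cons_ne _ (Ne.symm hbx)]
      have := ih ha hb h
      omega

theorem pvMent_mem (P : List String) (l : List (Int × String)) (s : PySem.Set String)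
    (x : Int × String) :
    x ∈ pvMent P l s ↔ x = ((P.idxOf x.2 : Int), x.2) ∧ x.2 ∈ l.map (·.2) ∧ x.2 ∈ P ∧ x.2 ∉ s := by
  induction l generalizing s with
  | nil => simp [pvMent]
  | cons ic l ih =>
    by_cases hP : ic.2 ∈ P
    · by_cases hs : ic.2 ∈ s
      · rw [pvMent, if_pos hP, if_pos hs]
        rw [ih]
        simp only [List.map_cons, List.mem_cons]
        constructor
        · rintro ⟨h1, h2, h3, h4⟩; exact ⟨h1, Or.inr h2, h3, h4⟩
        · rintro ⟨h1, h2 | h2, h3, h4⟩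
          · exact absurd (h2 ▸ hs) h4
          · exact ⟨h1, h2, h3, h4⟩
      · rw [pvMent, if_pos hP, if_neg hs]
        simp only [List.mem_cons, ih, List.map_cons, PySem.Set.mem_add]
        constructor
        · rintro (rfl | ⟨h1, h2, h3, h4⟩)
          · exact ⟨rfl, Or.inl rfl, hP, hs⟩
          · exact ⟨h1, Or.inr h2, h3, fun hx => h4 (Or.inl hx)⟩
        · rintro ⟨h1, h2 | h2, h3, h4⟩
          · left; rw [h1, ← h2]
          · by_cases hxc : x.2 = ic.2
            · left; rw [h1, ← hxc]
            · exact Or.inr ⟨h1, h2, h3, fun hx => hx.elim h4 hxc⟩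
    · rw [pvMent, if_neg hP]
      rw [ih]
      simp only [List.map_cons, List.mem_cons]
      constructor
      · rintro ⟨h1, h2, h3, h4⟩; exact ⟨h1, Or.inr h2, h3, h4⟩
      · rintro ⟨h1, h2 | h2, h3, h4⟩
        · exact absurd (h2 ▸ h3) hP
        · exact ⟨h1, h2, h3, h4⟩

theorem pvMent_nodup (P : List String) (l : List (Int × String)) (s : PySem.Set String) :
    (pvMent P l s).Nodup := by
  induction l generalizing s with
  | nil => simp [pvMent]
  | cons ic l ih =>
    by_cases hP : ic.2 ∈ P
    · by_cases hs : ic.2 ∈ s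
      · rw [pvMent, if_pos hP, if_pos hs]; exact ih s
      · rw [pvMent, if_pos hP, if_neg hs]
        refine List.Pairwise.cons ?_ (ih _)
        intro b hb
        have hb2 := ((pvMent_mem P l _ b).mp hb).2.2.2
        intro h
        have : b.2 = ic.2 := by rw [← h]
        exact hb2 (this ▸ (PySem.Set.mem_add s ic.2 ic.2).mpr (Or.inr rfl))
    · rw [pvMent, if_neg hP]; exact ih s

theorem pvUnm_mem (P : List String) (n : Int) (l : List (Int × String)) (x : Int × String) :
    x ∈ pvUnm P n l ↔ ∃ p ∈ l, x = (n + p.1, p.2) ∧ p.2 ∉ P := by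
  induction l with
  | nil => simp [pvUnm]
  | cons ic l ih =>
    by_cases hP : ic.2 ∈ P
    · rw [pvUnm, if_pos hP, ih]
      constructor
      · rintro ⟨p, hp, h1, h2⟩; exact ⟨p, List.mem_cons_of_mem _ hp, h1, h2⟩
      · rintro ⟨p, hp, h1, h2⟩
        rcases List.mem_cons.mp hp with rfl | hp'
        · exact absurd hP h2
        · exact ⟨p, hp', h1, h2⟩
    · rw [pvUnm, if_neg hP]
      constructor
      · intro hx
        rcases List.mem_cons.mp hx with rfl | hx'
        · exact ⟨ic, List.mem_cons_self .., rfl, hP⟩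
        · rcases ih.mp hx' with ⟨p, hp, h1, h2⟩
          exact ⟨p, List.mem_cons_of_mem _ hp, h1, h2⟩
      · rintro ⟨p, hp, h1, h2⟩
        rcases List.mem_cons.mp hp with rfl | hp'
        · rw [h1]; exact List.mem_cons_self ..
        · exact List.mem_cons_of_mem _ (ih.mpr ⟨p, hp', h1, h2⟩)

theorem pvUnm_map_snd (P : List String) (n : Int) (l : List (Int × String)) :
    (pvUnm P n l).map (·.2) = (l.map (·.2)).filter (fun c => !(decide (c ∈ P))) := by
  induction l with
  | nil => simp [pvUnm]
  | cons ic l ih =>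
    by_cases hP : ic.2 ∈ P
    · rw [pvUnm, if_pos hP, ih]
      simp [hP]
    · rw [pvUnm, if_neg hP]
      simp [hP, ih]

theorem pvUnm_pairwise (P : List String) (n : Int) (l : List (Int × String))
    (h : l.Pairwise (fun p q => p.1 < q.1)) :
    (pvUnm P n l).Pairwise (fun a b => a.1 < b.1) := by
  induction l with
  | nil => simp [pvUnm]
  | cons ic l ih =>
    have htail := ih h.of_cons
    by_cases hP : ic.2 ∈ P
    · rw [pvUnm, if_pos hP]; exact htail
    · rw [pvUnm, if_neg hP]
      refine List.Pairwise.cons ?_ htail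
      intro b hb
      rcases (pvUnm_mem P n l b).mp hb with ⟨p, hp, rfl, -⟩
      have := (List.pairwise_cons.mp h).1 p hp
      simpa using this

-- A's first loop computes the diagonal pair (S, S), S = parts kept & deduped
theorem pvAfold (K : List String) (P : List String) (s : PySem.Set String) :
    P.foldl
      (fun (st : List String × PySem.Set String) c =>
        if c ∈ K ∧ c ∉ st.2 then (st.1 ++ [c], PySem.Set.add st.2 c) else st) (s, s)
      = (PySem.Set.update s (P.filter (fun c => decide (c ∈ K))),
         PySem.Set.update s (P.filter (fun c => decide (c ∈ K)))) := by
  induction P generalizing s with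
  | nil => simp [PySem.Set.update]
  | cons c P ih =>
    by_cases hK : c ∈ K
    · by_cases hs : c ∈ s
      · rw [List.foldl_cons, if_neg (by tauto)]
        rw [List.filter_cons_of_pos (by simpa using hK)]
        show _ = (PySem.Set.update (PySem.Set.add s c) _, PySem.Set.update (PySem.Set.add s c) _)
        rw [PySem.Set.add_of_mem hs]
        exact ih s
      · rw [List.foldl_cons, if_pos ⟨hK, hs⟩]
        rw [List.filter_cons_of_pos (by simpa using hK)]
        show _ = (PySem.Set.update (PySem.Set.add s c) _, PySem.Set.update (PySem.Set.add s c) _)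
        rw [PySem.Set.add_of_not_mem hs]
        exact ih (s ++ [c])
    · rw [List.foldl_cons, if_neg (by tauto)]
      rw [List.filter_cons_of_neg (by simpa using hK)]
      exact ih s

-- rank.get? = first index in parts
theorem pvRank_get (P : List String) (c : String) :
    ((PySem.List.enumerate P 0).foldl
      (fun d p => PySem.Dict.setdefault d p.2 p.1) PySem.Dict.empty).get? c
      = if c ∈ P then some ((P.idxOf c : Int)) else none := by
  have main : ∀ (l : List (Int × String)) (d : PySem.Dict String Int) (c : String),
      (l.foldl (fun d p => PySem.Dict.setdefault d p.2 p.1) d).get? c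
        = (d.get? c).or ((l.find? (fun p => p.2 == c)).map (·.1)) := by
    intro l
    induction l with
    | nil => simp
    | cons p l ih =>
      intro d c
      rw [List.foldl_cons, ih]
      by_cases hcont : d.contains p.2
      · rw [PySem.Dict.setdefault_of_contains d p.1 hcont]
        by_cases hpc : p.2 = c
        · subst hpc
          have : (d.get? p.2).isSome := by
            rw [← PySem.Dict.contains_eq_isSome_get?]; exact hcont
          rcases Option.isSome_iff_exists.mp this with ⟨v, hv⟩
          rw [List.find?_cons_of_pos (by simp)]
          simp [hv]
        · rw [List.find?_cons_of_neg (by simp [hpc])]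
      · rw [PySem.Dict.setdefault_of_not_contains d p.1 (by simpa using hcont)]
        by_cases hpc : p.2 = c
        · subst hpc
          rw [PySem.Dict.get?_insert_self]
          have hnone : d.get? p.2 = none := by
            rw [PySem.Dict.get?_eq_none_iff_contains]; simpa using hcont
          rw [List.find?_cons_of_pos (by simp), hnone]
          simp
        · rw [PySem.Dict.get?_insert_of_ne _ _ (Ne.symm hpc) ..]
          rw [List.find?_cons_of_neg (by simp [hpc])]
  have hfind : ∀ (P : List String) (s : Int),
      ((PySem.List.enumerate P s).find? (fun p => p.2 == c))
        = if c ∈ P then some (s + (P.idxOf c : Int), c) else none := by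
    intro P
    induction P with
    | nil => intro s; simp [PySem.List.enumerate]
    | cons x P ih =>
      intro s
      rw [PySem.List.enumerate_cons]
      by_cases hxc : x = c
      · subst hxc
        rw [List.find?_cons_of_pos (by simp)]
        simp [List.idxOf_cons_self]
      · rw [List.find?_cons_of_neg (by simp [hxc]), ih]
        by_cases hc : c ∈ P
        · have hmem : c ∈ x :: P := List.mem_cons_of_mem x hc
          rw [if_pos hc, if_pos hmem, List.idxOf_cons_ne P hxc]
          simp only [Option.some.injEq, Prod.mk.injEq]
          exact ⟨by push_cast; omega, trivial⟩
        · rw [if_neg hc, if_neg (by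
            simp only [List.mem_cons, not_or]
            exact ⟨fun h => hxc h.symm, hc⟩)]
  rw [main, hfind, PySem.Dict.get?_empty, Option.none_or]
  by_cases hc : c ∈ P
  · simp [hc]
  · simp [hc]

-- B's pass over enumerate(known): the keyed list splits (as a multiset) into mentioned ++ unmentioned
theorem pvBfold (P : List String) (n : Int) (rank : PySem.Dict String Int)
    (hr : ∀ c, rank.get? c = if c ∈ P then some ((P.idxOf c : Int)) else none)
    (l : List (Int × String)) (acc : List (Int × String)) (s : PySem.Set String) :
    (l.foldl
      (fun (st : List (Int × String) × PySem.Set String) ic =>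
        match PySem.Dict.get? rank ic.2 with
        | none => (st.1 ++ [(n + ic.1, ic.2)], st.2)
        | some r => if ic.2 ∈ st.2 then st else (st.1 ++ [(r, ic.2)], PySem.Set.add st.2 ic.2))
      (acc, s)).1.Perm (acc ++ pvMent P l s ++ pvUnm P n l) := by
  induction l generalizing acc s with
  | nil => simp [pvMent, pvUnm]
  | cons ic l ih =>
    rw [List.foldl_cons]
    by_cases hP : ic.2 ∈ P
    · by_cases hs : ic.2 ∈ s
      · have : (match PySem.Dict.get? rank ic.2 with
          | none => (acc ++ [(n + ic.1, ic.2)], s)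
          | some r => if ic.2 ∈ s then (acc, s) else (acc ++ [(r, ic.2)], PySem.Set.add s ic.2))
            = (acc, s) := by rw [hr]; simp [hP, hs]
        rw [this]
        rw [pvMent, if_pos hP, if_pos hs, pvUnm, if_pos hP]
        exact ih acc s
      · have : (match PySem.Dict.get? rank ic.2 with
          | none => (acc ++ [(n + ic.1, ic.2)], s)
          | some r => if ic.2 ∈ s then (acc, s) else (acc ++ [(r, ic.2)], PySem.Set.add s ic.2))
            = (acc ++ [((P.idxOf ic.2 : Int), ic.2)], PySem.Set.add s ic.2) := by
          rw [hr]; simp [hP, hs]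
        rw [this]
        rw [pvMent, if_pos hP, if_neg hs, pvUnm, if_pos hP]
        refine (ih _ _).trans ?_
        simp only [List.append_assoc, List.cons_append, List.nil_append]
        exact List.Perm.refl _
    · have : (match PySem.Dict.get? rank ic.2 with
        | none => (acc ++ [(n + ic.1, ic.2)], s)
        | some r => if ic.2 ∈ s then (acc, s) else (acc ++ [(r, ic.2)], PySem.Set.add s ic.2))
          = (acc ++ [(n + ic.1, ic.2)], s) := by rw [hr]; simp [hP]
      rw [this]
      rw [pvMent, if_neg hP, pvUnm, if_neg hP]
      refine (ih _ _).trans ?_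
      have h1 : (acc ++ [(n + ic.1, ic.2)]) ++ pvMent P l s ++ pvUnm P n l
          = acc ++ ((n + ic.1, ic.2) :: (pvMent P l s ++ pvUnm P n l)) := by simp
      have h2 : acc ++ pvMent P l s ++ (n + ic.1, ic.2) :: pvUnm P n l
          = acc ++ (pvMent P l s ++ (n + ic.1, ic.2) :: pvUnm P n l) := by simp
      rw [h1, h2]
      exact List.Perm.append_left acc (List.perm_middle).symm

-- the core equality for the non-empty branch
theorem pvCore (P K : List String) :
    (PySem.List.sorted
      ((PySem.List.enumerate K 0).foldl
        (fun (st : List (Int × String) × PySem.Set String) ic =>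
          match PySem.Dict.get? ((PySem.List.enumerate P 0).foldl
              (fun d p => PySem.Dict.setdefault d p.2 p.1) PySem.Dict.empty) ic.2 with
          | none => (st.1 ++ [((P.length : Int) + ic.1, ic.2)], st.2)
          | some r => if ic.2 ∈ st.2 then st else (st.1 ++ [(r, ic.2)], PySem.Set.add st.2 ic.2))
        ([], PySem.Set.empty)).1 (fun t => t.1) false).map (fun t => t.2)
    = (let os := P.foldl
        (fun (st : List String × PySem.Set String) c =>
          if c ∈ K ∧ c ∉ st.2 then (st.1 ++ [c], PySem.Set.add st.2 c) else st)
        ([], PySem.Set.empty)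
       K.foldl (fun out c => if c ∉ os.2 then out ++ [c] else out) os.1) := by
  have hr := pvRank_get P
  set n : Int := (P.length : Int) with hn
  set filt : List String := P.filter (fun c => decide (c ∈ K)) with hfilt
  set S : List String := pvDed filt [] with hSdef
  set f : String → Int × String := fun c => ((P.idxOf c : Int), c) with hf
  -- membership in S
  have hSmem : ∀ c, c ∈ S ↔ c ∈ P ∧ c ∈ K := by
    intro c
    rw [hSdef, pvDed_mem, hfilt]
    simp [List.mem_filter]
  -- A's first loop computes (S, S)
  have hA : P.foldl
      (fun (st : List String × PySem.Set String) c =>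
        if c ∈ K ∧ c ∉ st.2 then (st.1 ++ [c], PySem.Set.add st.2 c) else st)
      ([], PySem.Set.empty) = (S, S) := by
    have h := pvAfold K P PySem.Set.empty
    rw [pvUpdate_eq] at h
    simpa [hSdef, hfilt] using h
  -- B's loop, as a multiset
  have hBperm : ((PySem.List.enumerate K 0).foldl
      (fun (st : List (Int × String) × PySem.Set String) ic =>
        match PySem.Dict.get? ((PySem.List.enumerate P 0).foldl
            (fun d p => PySem.Dict.setdefault d p.2 p.1) PySem.Dict.empty) ic.2 with
        | none => (st.1 ++ [(n + ic.1, ic.2)], st.2)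
        | some r => if ic.2 ∈ st.2 then st else (st.1 ++ [(r, ic.2)], PySem.Set.add st.2 ic.2))
      ([], PySem.Set.empty)).1.Perm
        (pvMent P (PySem.List.enumerate K 0) PySem.Set.empty
          ++ pvUnm P n (PySem.List.enumerate K 0)) := by
    simpa using pvBfold P n _ hr (PySem.List.enumerate K 0) [] PySem.Set.empty
  -- the mentioned part is S keyed by rank, up to permutation
  have hMperm : (pvMent P (PySem.List.enumerate K 0) PySem.Set.empty).Perm (S.map f) := by
    apply (List.perm_ext_iff_of_nodup (pvMent_nodup _ _ _) ?_).mpr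
    · intro x
      rw [pvMent_mem, PySem.List.map_snd_enumerate]
      constructor
      · rintro ⟨h1, h2, h3, -⟩
        exact List.mem_map.mpr ⟨x.2, (hSmem x.2).mpr ⟨h3, h2⟩, h1.symm⟩
      · rintro hx
        rcases List.mem_map.mp hx with ⟨c, hc, rfl⟩
        rcases (hSmem c).mp hc with ⟨hcP, hcK⟩
        exact ⟨rfl, hcK, hcP, by simp [PySem.Set.empty]⟩
    · refine List.Nodup.map ?_ (pvDed_nodup _ _)
      intro a b hab
      simpa [hf] using congrArg Prod.snd hab
  -- the sorted keyed list, named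
  have hT : PySem.List.sorted
      ((PySem.List.enumerate K 0).foldl
        (fun (st : List (Int × String) × PySem.Set String) ic =>
          match PySem.Dict.get? ((PySem.List.enumerate P 0).foldl
              (fun d p => PySem.Dict.setdefault d p.2 p.1) PySem.Dict.empty) ic.2 with
          | none => (st.1 ++ [(n + ic.1, ic.2)], st.2)
          | some r => if ic.2 ∈ st.2 then st else (st.1 ++ [(r, ic.2)], PySem.Set.add st.2 ic.2))
        ([], PySem.Set.empty)).1 (fun t => t.1) false
      = S.map f ++ pvUnm P n (PySem.List.enumerate K 0) := by
    apply PySem.List.sorted_eq_of_perm_of_pairwise_lt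
    · exact (List.Perm.append_right _ hMperm.symm).trans hBperm.symm
    · refine List.pairwise_append.mpr ⟨?_, ?_, ?_⟩
      · refine List.pairwise_map.mpr ?_
        refine (pvDed_pairwise filt []).imp_of_mem ?_
        intro a b ha hb h
        have ha' : a ∈ filt := ((pvDed_mem filt [] a).mp ha).1
        have hb' : b ∈ filt := ((pvDed_mem filt [] b).mp hb).1
        have := pvIdx_filter_mono P (fun c => decide (c ∈ K)) a b ha' hb' h
        simp only [hf]
        exact_mod_cast this
      · exact pvUnm_pairwise P n _ (PySem.List.pairwise_lt_enumerate K 0)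
      · intro a ha b hb
        rcases List.mem_map.mp ha with ⟨c, hc, rfl⟩
        have hcP : c ∈ P := ((hSmem c).mp hc).1
        have hidx : P.idxOf c < P.length := List.idxOf_lt_length_of_mem hcP
        rcases (pvUnm_mem P n _ b).mp hb with ⟨p, hp, rfl, -⟩
        rcases (PySem.List.mem_enumerate_iff K 0 p).mp hp with ⟨k, hk, rfl⟩
        simp only [hf, hn]
        omega
  rw [hT]
  show (List.map f S ++ pvUnm P n (PySem.List.enumerate K 0)).map (fun t => t.2)
      = K.foldl (fun out c => if c ∉ (P.foldl
          (fun (st : List String × PySem.Set String) c =>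
            if c ∈ K ∧ c ∉ st.2 then (st.1 ++ [c], PySem.Set.add st.2 c) else st)
          ([], PySem.Set.empty)).2 then out ++ [c] else out)
        (P.foldl
          (fun (st : List String × PySem.Set String) c =>
            if c ∈ K ∧ c ∉ st.2 then (st.1 ++ [c], PySem.Set.add st.2 c) else st)
          ([], PySem.Set.empty)).1
  rw [hA]
  rw [PySem.List.foldl_append_ite_eq_filter]
  simp only [List.map_append, List.map_map]
  congr 1
  · have : ((fun t : Int × String => t.2) ∘ f) = id := by funext c; simp [hf]
    rw [this, List.map_id]
  · rw [pvUnm_map_snd, PySem.List.map_snd_enumerate]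
    refine List.filter_congr ?_
    intro c hcK
    have hiff : (c ∈ (S : PySem.Set String)) ↔ c ∈ P := by
      rw [hSmem c]
      exact ⟨fun h => h.1, fun h => ⟨h, hcK⟩⟩
    simp [hiff]

-- ===== VERDICT (by name: the statement is the Claim_ definition above) =====
theorem parse_category_order_py_spec : Claim_equal_parse_category_order_py := by
  intro order_text known_categories _
  unfold Spec_parse_category_order_py parse_category_order_py parse_category_order_py_alt
  by_cases h : PySem.Str.strip order_text = ""
  · simp [h]
  · simp only [h, if_false]
    exact (pvCore (pvParts (PySem.Str.strip order_text)) known_categories).symm
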